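-- pv_equiv track=rewrite | github.com/codecontemplator/aoc2024 | day22/d22p2.py | seqToPriceMap
-- ===== SOURCE A (Python) =====
-- import itertools as iter
--
-- def mix(a, b):
--     return a ^ b
--
-- def prune(x):
--     return x % 16777216
--
-- def nextSecret(secret):
--     t0 = secret
--     t1 = prune(mix(t0*64, t0))
--     t2 = prune(mix(t1//32, t1))
--     t3 = prune(mix(t2*2048, t2))
--     return t3
--
-- def price(secret):
--     return secret % 10
--
-- def secrets(seed):
--     secret = seed
--     while True:
--         yield secret
--         secret = nextSecret(secret)
--
-- def seqToPriceMap(seed, numIter):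
--     gen = iter.pairwise(secrets(seed))
--     curSeq = []
--     result = dict()
--     for _ in range(numIter):
--         a, b = next(gen)
--         pa, pb = price(a), price(b)
--         dp = pb - pa
--         if len(curSeq) > 3:
--             curSeq = curSeq[1:] + [dp]
--         else:
--             curSeq.append(dp)
--
--         if len(curSeq) == 4:
--             key = tuple(curSeq)
--             if not key in result:
--                 result[key] = pb
--
--     return result
-- ===== SOURCE B (Python) =====
-- def nextSecret(secret):
--     s = (secret ^ (secret * 64)) % 16777216
--     s = (s ^ (s // 32)) % 16777216
--     s = (s ^ (s * 2048)) % 16777216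
--     return s
--
-- def seqToPriceMap(seed, numIter):
--     # build the whole price sequence first, then scan indexed 4-diff windows
--     p = []
--     s = seed
--     for _ in range(numIter + 1):
--         p.append(s % 10)
--         s = nextSecret(s)
--     result = {}
--     for j in range(numIter - 3):
--         key = (p[j+1] - p[j], p[j+2] - p[j+1], p[j+3] - p[j+2], p[j+4] - p[j+3])
--         result.setdefault(key, p[j+4])
--     return result
-- ===== Notes on version B (the rewrite author's own statement) =====
-- stated objective: alternative
-- what changed: Replaces A's incremental rolling 4-diff window over a pairwise secrets generator by first materialising the whole price list and then scanning indexed 4-diff windows with dict.setdefault.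
import Mathlib
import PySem

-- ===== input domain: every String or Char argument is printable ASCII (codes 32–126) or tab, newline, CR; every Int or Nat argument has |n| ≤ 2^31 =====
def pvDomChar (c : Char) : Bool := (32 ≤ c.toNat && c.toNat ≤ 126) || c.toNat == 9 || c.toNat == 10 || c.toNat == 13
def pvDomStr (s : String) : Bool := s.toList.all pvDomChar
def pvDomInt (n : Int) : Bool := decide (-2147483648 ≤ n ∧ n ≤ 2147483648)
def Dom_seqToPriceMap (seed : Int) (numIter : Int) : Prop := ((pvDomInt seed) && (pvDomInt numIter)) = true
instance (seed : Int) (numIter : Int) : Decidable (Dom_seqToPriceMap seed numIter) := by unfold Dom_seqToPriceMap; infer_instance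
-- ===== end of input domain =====

-- B replaces A's rolling 4-diff window over a secrets generator by building the whole
-- price list first and scanning indexed windows with setdefault (objective: alternative decomposition).

-- ===== PORT A =====
def pvMixA (a b : Int) : Int := PySem.Int.bxor a b

def pvPruneA (x : Int) : Int := PySem.Int.mod x 16777216

def pvNextSecretA (secret : Int) : Int :=
  let t0 := secret
  let t1 := pvPruneA (pvMixA (t0 * 64) t0)
  let t2 := pvPruneA (pvMixA (PySem.Int.floordiv t1 32) t1)
  let t3 := pvPruneA (pvMixA (t2 * 2048) t2)
  t3

def pvPriceA (secret : Int) : Int := PySem.Int.mod secret 10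

-- one iteration of A's for-loop: state = (secret at the generator head, curSeq, result)
def pvStepA (st : Int × List Int × PySem.Dict (Int × Int × Int × Int) Int) :
    Int × List Int × PySem.Dict (Int × Int × Int × Int) Int :=
  let a := st.1
  let curSeq := st.2.1
  let result := st.2.2
  let b := pvNextSecretA a
  let pa := pvPriceA a
  let pb := pvPriceA b
  let dp := pb - pa
  let curSeq' := if curSeq.length > 3 then curSeq.drop 1 ++ [dp] else curSeq ++ [dp]
  let result' :=
    if curSeq'.length == 4 then
      match curSeq' with
      | [w, x, y, z] =>
        let key := (w, x, y, z)
        if result.contains key then result else result.insert key pb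
      | _ => result
    else result
  (b, curSeq', result')

def seqToPriceMap (seed : Int) (numIter : Int) : List (Int × Int × Int × Int × Int) :=
  let fin := (PySem.List.pyRange 0 numIter 1).foldl (fun st _ => pvStepA st)
      (seed, ([], PySem.Dict.empty))
  fin.2.2.items.map (fun e => (e.1.1, e.1.2.1, e.1.2.2.1, e.1.2.2.2, e.2))

-- ===== PORT B =====
def pvNextSecretB (secret : Int) : Int :=
  let s1 := PySem.Int.mod (PySem.Int.bxor secret (secret * 64)) 16777216
  let s2 := PySem.Int.mod (PySem.Int.bxor s1 (PySem.Int.floordiv s1 32)) 16777216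
  PySem.Int.mod (PySem.Int.bxor s2 (s2 * 2048)) 16777216

def seqToPriceMap_alt (seed : Int) (numIter : Int) : List (Int × Int × Int × Int × Int) :=
  -- build the price list p (Source B's first loop)
  let p := ((PySem.List.pyRange 0 (numIter + 1) 1).foldl
      (fun (st : List Int × Int) _ => (st.1 ++ [PySem.Int.mod st.2 10], pvNextSecretB st.2))
      ([], seed)).1
  -- indexed window scan (Source B's second loop); every index is in range, so pyGetD _ _ 0 is exact here
  let result := (PySem.List.pyRange 0 (numIter - 3) 1).foldl
      (fun (r : PySem.Dict (Int × Int × Int × Int) Int) j =>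
        let key := (PySem.List.pyGetD p (j + 1) 0 - PySem.List.pyGetD p j 0,
                    PySem.List.pyGetD p (j + 2) 0 - PySem.List.pyGetD p (j + 1) 0,
                    PySem.List.pyGetD p (j + 3) 0 - PySem.List.pyGetD p (j + 2) 0,
                    PySem.List.pyGetD p (j + 4) 0 - PySem.List.pyGetD p (j + 3) 0)
        r.setdefault key (PySem.List.pyGetD p (j + 4) 0))
      PySem.Dict.empty
  result.items.map (fun e => (e.1.1, e.1.2.1, e.1.2.2.1, e.1.2.2.2, e.2))

-- ===== PRECONDITION & SPEC =====
def Spec_seqToPriceMap (seed : Int) (numIter : Int) (out : List (Int × Int × Int × Int × Int)) : Prop := out = seqToPriceMap_alt seed numIter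
instance (seed : Int) (numIter : Int) (out : List (Int × Int × Int × Int × Int)) : Decidable (Spec_seqToPriceMap seed numIter out) := by unfold Spec_seqToPriceMap; infer_instance

-- ===== CLAIM (what is proved, stated in full; the proofs are below) =====
def Claim_equal_seqToPriceMap : Prop := ∀ (seed : Int) (numIter : Int), Dom_seqToPriceMap seed numIter → Spec_seqToPriceMap seed numIter (seqToPriceMap seed numIter)

-- ===== LEMMAS AND PROOFS =====

-- k-th secret / price / diff of the sequence started at seed
def pvSec (seed : Int) : Nat → Int
  | 0 => seed
  | k + 1 => pvNextSecretA (pvSec seed k)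

def pvPr (seed : Int) (k : Nat) : Int := pvPriceA (pvSec seed k)

def pvDf (seed : Int) (k : Nat) : Int := pvPr seed (k + 1) - pvPr seed k

def pvKey (seed : Int) (j : Nat) : Int × Int × Int × Int :=
  (pvDf seed j, pvDf seed (j + 1), pvDf seed (j + 2), pvDf seed (j + 3))

-- canonical result after n iterations
def pvRes (seed : Int) (n : Nat) : PySem.Dict (Int × Int × Int × Int) Int :=
  (List.range (n - 3)).foldl
    (fun r j => r.setdefault (pvKey seed j) (pvPr seed (j + 4))) PySem.Dict.empty

def pvWin (seed : Int) (n : Nat) : List Int :=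
  ((List.range n).map (pvDf seed)).drop (n - 4)

lemma pvNextB_eq (s : Int) : pvNextSecretB s = pvNextSecretA s := by
  simp [pvNextSecretA, pvNextSecretB, pvMixA, pvPruneA, PySem.Int.bxor_comm]

lemma pvWin_explicit (seed : Int) (n : Nat) (h : 3 ≤ n) :
    pvWin seed (n + 1) =
      [pvDf seed (n - 3), pvDf seed (n - 2), pvDf seed (n - 1), pvDf seed n] := by
  unfold pvWin
  rw [show n + 1 = (n - 3) + 4 by omega, List.range_add, List.map_append, List.map_map]
  rw [show n - 3 + 4 - 4 = ((List.range (n - 3)).map (pvDf seed)).length by simp]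
  rw [List.drop_left]
  simp [List.range_succ, show n - 3 + 1 = n - 2 by omega, show n - 3 + 2 = n - 1 by omega,
    show n - 3 + 3 = n by omega]


lemma pvRes_succ (seed : Int) (n : Nat) (h3 : 3 ≤ n) :
    pvRes seed (n + 1) =
      (if (pvRes seed n).contains (pvKey seed (n - 3)) then pvRes seed n
       else (pvRes seed n).insert (pvKey seed (n - 3)) (pvPr seed (n + 1))) := by
  unfold pvRes
  rw [show n + 1 - 3 = (n - 3) + 1 by omega, List.range_succ, List.foldl_append]
  by_cases hc : ((List.range (n - 3)).foldl
      (fun r j => r.setdefault (pvKey seed j) (pvPr seed (j + 4))) PySem.Dict.empty).contains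
      (pvKey seed (n - 3)) = true
  · simp [hc, PySem.Dict.setdefault_of_contains _ _ hc]
  · simp only [Bool.not_eq_true] at hc
    simp [hc, PySem.Dict.setdefault_of_not_contains _ _ hc,
      show n - 3 + 4 = n + 1 by omega]

lemma pvStepA_eq (seed : Int) (n : Nat) :
    pvStepA (pvSec seed n, pvWin seed n, pvRes seed n) =
      (pvSec seed (n + 1), pvWin seed (n + 1), pvRes seed (n + 1)) := by
  have hpb : pvPriceA (pvSec seed (n + 1)) = pvPr seed (n + 1) := rfl
  have hpa : pvPriceA (pvSec seed n) = pvPr seed n := rfl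
  have hdf : pvPriceA (pvSec seed (n + 1)) - pvPr seed n = pvDf seed n := rfl
  have hsec : pvNextSecretA (pvSec seed n) = pvSec seed (n + 1) := rfl
  have hdf2 : pvPr seed (n + 1) - pvPr seed n = pvDf seed n := rfl
  by_cases h3 : 3 ≤ n
  · have hw1 := pvWin_explicit seed n h3
    rcases Nat.lt_or_ge n 4 with h4 | h4
    · have hn : n = 3 := by omega
      subst hn
      have hw0 : pvWin seed 3 = [pvDf seed 0, pvDf seed 1, pvDf seed 2] := by
        simp [pvWin, List.range_succ]
      rw [pvRes_succ seed 3 (by omega)]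
      simp only [pvStepA, hw0, hw1]
      simp [hsec, hpa, hdf2, hpb, pvKey]
    · have hw0 := pvWin_explicit seed (n - 1) (by omega)
      rw [show n - 1 + 1 = n by omega, show n - 1 - 3 = n - 4 by omega,
        show n - 1 - 2 = n - 3 by omega, show n - 1 - 1 = n - 2 by omega] at hw0
      rw [pvRes_succ seed n h3]
      simp only [pvStepA, hw0, hw1]
      simp [hsec, hpa, hdf2, hpb, pvKey, show n - 3 + 1 = n - 2 by omega,
        show n - 3 + 2 = n - 1 by omega, show n - 3 + 3 = n by omega]
  · have hr : pvRes seed (n + 1) = pvRes seed n := by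
      unfold pvRes
      rw [show n + 1 - 3 = n - 3 by omega]
    have hw0 : pvWin seed n = (List.range n).map (pvDf seed) := by
      simp [pvWin, show n - 4 = 0 by omega]
    have hw1 : pvWin seed (n + 1) = (List.range (n + 1)).map (pvDf seed) := by
      simp [pvWin, show n + 1 - 4 = 0 by omega]
    rw [hr]
    simp only [pvStepA, hw0, hw1]
    simp [hsec, hpa, hdf2, hpb, List.range_succ, show ¬ (n > 3) by omega]
    intro hn
    exact absurd hn (by omega)

lemma loopA (seed : Int) (n : Nat) :
    (PySem.List.pyRange 0 (n : Int) 1).foldl (fun st _ => pvStepA st)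
      (seed, ([], PySem.Dict.empty)) = (pvSec seed n, pvWin seed n, pvRes seed n) := by
  induction n with
  | zero =>
    simp [PySem.List.pyRange_one_eq_nil (le_refl (0 : Int)), pvSec, pvWin, pvRes]
  | succ k ih =>
    rw [show ((k + 1 : Nat) : Int) = (k : Int) + 1 by push_cast; ring,
      PySem.List.pyRange_one_succ_right (by positivity), List.foldl_append, ih]
    simpa using pvStepA_eq seed k

lemma loopB_p (seed : Int) (m : Nat) :
    (PySem.List.pyRange 0 (m : Int) 1).foldl
      (fun (st : List Int × Int) _ => (st.1 ++ [PySem.Int.mod st.2 10], pvNextSecretB st.2))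
      ([], seed) = ((List.range m).map (pvPr seed), pvSec seed m) := by
  induction m with
  | zero =>
    simp [PySem.List.pyRange_one_eq_nil (le_refl (0 : Int)), pvSec]
  | succ k ih =>
    rw [show ((k + 1 : Nat) : Int) = (k : Int) + 1 by push_cast; ring,
      PySem.List.pyRange_one_succ_right (by positivity), List.foldl_append, ih]
    simp [List.range_succ, pvNextB_eq,
      show pvNextSecretA (pvSec seed k) = pvSec seed (k + 1) from rfl]
    simp [pvPr, pvPriceA]

lemma loopB_res (seed : Int) (n : Nat) (k : Nat) (hk : k ≤ n - 3) :
    (PySem.List.pyRange 0 (k : Int) 1).foldl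
      (fun (r : PySem.Dict (Int × Int × Int × Int) Int) j =>
        r.setdefault
          (PySem.List.pyGetD ((List.range (n + 1)).map (pvPr seed)) (j + 1) 0 -
             PySem.List.pyGetD ((List.range (n + 1)).map (pvPr seed)) j 0,
           PySem.List.pyGetD ((List.range (n + 1)).map (pvPr seed)) (j + 2) 0 -
             PySem.List.pyGetD ((List.range (n + 1)).map (pvPr seed)) (j + 1) 0,
           PySem.List.pyGetD ((List.range (n + 1)).map (pvPr seed)) (j + 3) 0 -
             PySem.List.pyGetD ((List.range (n + 1)).map (pvPr seed)) (j + 2) 0,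
           PySem.List.pyGetD ((List.range (n + 1)).map (pvPr seed)) (j + 4) 0 -
             PySem.List.pyGetD ((List.range (n + 1)).map (pvPr seed)) (j + 3) 0)
          (PySem.List.pyGetD ((List.range (n + 1)).map (pvPr seed)) (j + 4) 0))
      PySem.Dict.empty =
    (List.range k).foldl
      (fun r j => r.setdefault (pvKey seed j) (pvPr seed (j + 4))) PySem.Dict.empty := by
  induction k with
  | zero =>
    simp [PySem.List.pyRange_one_eq_nil (le_refl (0 : Int))]
  | succ k ih =>
    rw [show ((k + 1 : Nat) : Int) = (k : Int) + 1 by push_cast; ring,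
      PySem.List.pyRange_one_succ_right (by positivity), List.foldl_append,
      ih (by omega), (List.range_succ : List.range (k + 1) = _), List.foldl_append]
    simp only [List.foldl]
    rw [show (k : Int) + 1 = ((k + 1 : Nat) : Int) by push_cast; ring,
      show (k : Int) + 2 = ((k + 2 : Nat) : Int) by push_cast; ring,
      show (k : Int) + 3 = ((k + 3 : Nat) : Int) by push_cast; ring,
      show (k : Int) + 4 = ((k + 4 : Nat) : Int) by push_cast; ring]
    simp only [PySem.List.pyGetD_natCast]
    rw [PySem.List.getD_map_range _ _ _ _ (by omega), PySem.List.getD_map_range _ _ _ _ (by omega),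
      PySem.List.getD_map_range _ _ _ _ (by omega), PySem.List.getD_map_range _ _ _ _ (by omega),
      PySem.List.getD_map_range _ _ _ _ (by omega)]
    simp [pvKey, pvDf, show k + 1 + 1 = k + 2 by omega, show k + 2 + 1 = k + 3 by omega,
      show k + 3 + 1 = k + 4 by omega]

-- ===== VERDICT (by name: the statement is the Claim_ definition above) =====
theorem seqToPriceMap_spec : Claim_equal_seqToPriceMap := by
  intro seed numIter _
  unfold Spec_seqToPriceMap seqToPriceMap seqToPriceMap_alt
  simp only []
  by_cases h : 0 ≤ numIter
  · have hni : numIter = ((numIter.toNat : Nat) : Int) := (Int.toNat_of_nonneg h).symm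
    rw [hni]
    rw [show ((numIter.toNat : Nat) : Int) + 1 = ((numIter.toNat + 1 : Nat) : Int) by push_cast; ring]
    rw [loopA seed numIter.toNat, loopB_p seed (numIter.toNat + 1)]
    by_cases h3 : 3 ≤ numIter.toNat
    · rw [show ((numIter.toNat : Nat) : Int) - 3 = ((numIter.toNat - 3 : Nat) : Int) by
        push_cast [h3]; ring]
      rw [loopB_res seed numIter.toNat (numIter.toNat - 3) le_rfl]
      rfl
    · rw [PySem.List.pyRange_one_eq_nil (by omega)]
      simp [pvRes, show numIter.toNat - 3 = 0 by omega]
  · rw [PySem.List.pyRange_one_eq_nil (show numIter ≤ (0 : Int) by omega),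
      PySem.List.pyRange_one_eq_nil (show numIter + 1 ≤ (0 : Int) by omega),
      PySem.List.pyRange_one_eq_nil (show numIter - 3 ≤ (0 : Int) by omega)]
    rfl
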